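-- pv_equiv track=rewrite | github.com/deepkumarchaudhary/python-poc | Test-5Mar23/test3_2.py | solution
-- ===== SOURCE A (Python) =====
-- def solution(L1, L2 ):
--     count = 0
--     if 'x' in (L2[0], L1[0]):
--         count += 1
--     for i in range(1, len(L1)):
--         j = i - 1
--         if L1[i] == 'x' and L2[i] == 'x':
--             count += 1
--         elif (L1[i] == 'x' and L2[i] == '.'):
--             if (L1[j] == '.' and L2[j] == 'x'):
--                 continue
--             count +=1
--         elif (L2[i] == 'x' and L1[i] == '.'):
--             if (L1[j] == 'x' and L2[j] == '.'):
--                 continue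
--             count += 1
--     return count
--     pass
-- ===== SOURCE B (Python) =====
-- def _cls(a, b):
--     # classify a column: 'B' both marked, 'T' top-single, 'S' bottom-single, 'E' otherwise
--     if a == 'x':
--         if b == 'x':
--             return 'B'
--         if b == '.':
--             return 'T'
--     elif a == '.' and b == 'x':
--         return 'S'
--     return 'E'
--
--
-- def solution(L1, L2):
--     # Build a class string for all columns, then answer by text counting:
--     # column 0 contributes 1 iff it holds an 'x'; every other non-'E' column
--     # contributes 1; each adjacent diagonal pair ("TS" or "ST") cancels one.
--     base = 1 if 'x' in (L1[0], L2[0]) else 0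
--     s = ''.join(_cls(L1[i], L2[i]) for i in range(len(L1)))
--     occupied = len(s) - 1 - s[1:].count('E')
--     cancels = s.count('TS') + s.count('ST')
--     return base + occupied - cancels
-- ===== Notes on version B (the rewrite author's own statement) =====
-- stated objective: alternative
-- what changed: A is one stateful loop with an explicit index lookback and 'continue'; B instead builds a class string over all columns ('B'/'T'/'S'/'E') and answers by text counting: interior non-'E' characters, minus the substring counts of 'TS' and 'ST', plus the column-0 check.
import Mathlib
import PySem

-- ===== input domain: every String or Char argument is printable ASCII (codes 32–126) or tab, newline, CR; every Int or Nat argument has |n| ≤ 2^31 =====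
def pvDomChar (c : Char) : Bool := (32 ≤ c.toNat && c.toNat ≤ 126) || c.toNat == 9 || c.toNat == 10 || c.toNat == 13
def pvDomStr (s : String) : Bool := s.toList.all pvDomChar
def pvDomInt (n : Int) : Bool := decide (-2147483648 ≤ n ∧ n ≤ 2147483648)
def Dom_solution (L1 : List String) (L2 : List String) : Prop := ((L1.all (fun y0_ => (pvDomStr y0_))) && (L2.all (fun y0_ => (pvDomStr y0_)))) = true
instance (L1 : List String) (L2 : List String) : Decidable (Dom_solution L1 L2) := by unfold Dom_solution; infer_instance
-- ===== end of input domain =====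

-- B replaces A's stateful lookback loop by a staged text computation: classify every
-- column into a class character, then answer by counting characters and the
-- substrings "TS"/"ST" (alternative decomposition, same cost).
-- ===== PORT A =====
-- A's for-loop over range(1, len(L1)); count is the running accumulator.
def solutionLoop (L1 : List String) (L2 : List String) (i : Nat) (count : Int) : Int :=
  if _h : i < L1.length then
    let j := i - 1
    let a := L1.getD i ""
    let b := L2.getD i ""
    let aj := L1.getD j ""
    let bj := L2.getD j ""
    let count' : Int :=
      if a = "x" ∧ b = "x" then count + 1
      else if a = "x" ∧ b = "." then
        (if aj = "." ∧ bj = "x" then count else count + 1)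
      else if b = "x" ∧ a = "." then
        (if aj = "x" ∧ bj = "." then count else count + 1)
      else count
    solutionLoop L1 L2 (i+1) count'
  else count
termination_by L1.length - i

def solution (L1 : List String) (L2 : List String) : Int :=
  let count : Int := if L2.getD 0 "" = "x" ∨ L1.getD 0 "" = "x" then 1 else 0
  solutionLoop L1 L2 1 count

-- ===== PORT B =====
-- Source B's _cls: classify a column as 'B' (both marked), 'T' (top-single), 'S' (bottom-single), 'E' (otherwise)
def clsB (a : String) (b : String) : Char :=
  if a = "x" then (if b = "x" then 'B' else if b = "." then 'T' else 'E')
  else if a = "." ∧ b = "x" then 'S' else 'E'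

-- Source B's solution; the joined class string is kept as its List Char and string
-- counting is PySem.Chars.count (= Python str.count) on that list.
def solution_alt (L1 : List String) (L2 : List String) : Int :=
  let base : Int := if L1.getD 0 "" = "x" ∨ L2.getD 0 "" = "x" then 1 else 0
  let s : List Char := (List.range L1.length).map (fun i => clsB (L1.getD i "") (L2.getD i ""))
  let occupied : Int := (s.length : Int) - 1 - (PySem.Chars.count (s.drop 1) ['E'] : Int)
  let cancels : Int := (PySem.Chars.count s ['T', 'S'] : Int) + (PySem.Chars.count s ['S', 'T'] : Int)
  base + occupied - cancels

-- ===== PRECONDITION & SPEC =====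
-- Pre_ excludes exactly the inputs where the Python A raises IndexError: L1 empty (L1[0]/L2[0]) or L2 shorter than L1 (L2[i] is read for every i < len(L1)).
def Pre_solution (L1 : List String) (L2 : List String) : Prop :=
  L1 ≠ [] ∧ L1.length ≤ L2.length
instance (L1 : List String) (L2 : List String) : Decidable (Pre_solution L1 L2) := by unfold Pre_solution; infer_instance

def pvWitness_solution : List String × List String := (["x", ".", "x"], [".", "x", "."])

def Spec_solution (L1 : List String) (L2 : List String) (out : Int) : Prop := out = solution_alt L1 L2
instance (L1 : List String) (L2 : List String) (out : Int) : Decidable (Spec_solution L1 L2 out) := by unfold Spec_solution; infer_instance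

-- ===== CLAIM (what is proved, stated in full; the proofs are below) =====
def Claim_equal_solution : Prop := ∀ (L1 : List String) (L2 : List String), Dom_solution L1 L2 → Pre_solution L1 L2 → Spec_solution L1 L2 (solution L1 L2)

-- ===== LEMMAS AND PROOFS =====

-- number of adjacent positions (i, i+1) holding exactly the characters (p, q)
def pairCnt (p : Char) (q : Char) : List Char → Nat
  | a :: b :: t => (if a = p ∧ b = q then 1 else 0) + pairCnt p q (b :: t)
  | _ => 0

-- per-column contribution of A's loop body at index i, expressed through B's classes
def contribC (L1 : List String) (L2 : List String) (i : Nat) : Int :=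
  (if clsB (L1.getD i "") (L2.getD i "") ≠ 'E' then (1 : Int) else 0)
    - (if (clsB (L1.getD (i-1) "") (L2.getD (i-1) "") = 'T' ∧ clsB (L1.getD i "") (L2.getD i "") = 'S')
        ∨ (clsB (L1.getD (i-1) "") (L2.getD (i-1) "") = 'S' ∧ clsB (L1.getD i "") (L2.getD i "") = 'T')
       then (1 : Int) else 0)

theorem clsB_eq_T (a b : String) : clsB a b = 'T' ↔ (a = "x" ∧ b = ".") := by
  unfold clsB; split_ifs <;> simp_all

theorem clsB_eq_S (a b : String) : clsB a b = 'S' ↔ (a = "." ∧ b = "x") := by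
  unfold clsB; split_ifs <;> simp_all

theorem clsB_ne_E (a b : String) :
    clsB a b ≠ 'E' ↔ ((a = "x" ∧ b = "x") ∨ (a = "x" ∧ b = ".") ∨ (a = "." ∧ b = "x")) := by
  unfold clsB; split_ifs <;> simp_all

theorem step_eq (a b aj bj : String) (c : Int) :
    (if a = "x" ∧ b = "x" then c + 1
      else if a = "x" ∧ b = "." then (if aj = "." ∧ bj = "x" then c else c + 1)
      else if b = "x" ∧ a = "." then (if aj = "x" ∧ bj = "." then c else c + 1)
      else c)
    = c + ((if clsB a b ≠ 'E' then (1 : Int) else 0)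
        - (if (clsB aj bj = 'T' ∧ clsB a b = 'S') ∨ (clsB aj bj = 'S' ∧ clsB a b = 'T')
           then (1 : Int) else 0)) := by
  simp only [clsB_ne_E, clsB_eq_T, clsB_eq_S]
  split_ifs <;> simp_all <;> tauto

theorem solutionLoop_eq (L1 L2 : List String) :
    ∀ n i c, L1.length - i = n →
      solutionLoop L1 L2 i c = c + (((List.range' i n).map (contribC L1 L2)).sum) := by
  intro n
  induction n with
  | zero =>
    intro i c h
    unfold solutionLoop
    have : ¬ i < L1.length := by omega
    simp [this]
  | succ m ih =>
    intro i c h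
    have hi : i < L1.length := by omega
    unfold solutionLoop
    simp only [hi, dif_pos, List.range'_succ, List.map_cons, List.sum_cons]
    rw [ih (i+1) _ (by omega),
      step_eq (L1.getD i "") (L2.getD i "") (L1.getD (i-1) "") (L2.getD (i-1) "")]
    unfold contribC
    ring

-- Python str.count of a single character is the plain character count.
theorem countGo_single (e : Char) :
    ∀ fuel (l : List Char) acc, l.length ≤ fuel →
      PySem.Chars.count.go [e] fuel l acc = acc + l.count e := by
  intro fuel
  induction fuel with
  | zero =>
    intro l acc h
    cases l with
    | nil => simp [PySem.Chars.count.go]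
    | cons a t => simp at h
  | succ m ih =>
    intro l acc h
    cases l with
    | nil => simp [PySem.Chars.count.go]
    | cons a t =>
      have hlen : t.length ≤ m := by simp at h; omega
      by_cases he : a = e
      · have hp : List.isPrefixOf [e] (a :: t) = true := by
          simp [List.isPrefixOf, he]
        have hd : List.drop [e].length (a :: t) = t := rfl
        simp only [PySem.Chars.count.go, hp, if_pos, hd]
        rw [ih t (acc + 1) hlen]
        simp [he]
        omega
      · have hea : ¬ e = a := fun h' => he h'.symm
        have hp : List.isPrefixOf [e] (a :: t) = false := by
          simp [List.isPrefixOf, hea]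
        simp only [PySem.Chars.count.go, hp]
        rw [ih t acc hlen]
        simp [he]

theorem count_single (l : List Char) (e : Char) :
    PySem.Chars.count l [e] = l.count e := by
  unfold PySem.Chars.count
  simpa using countGo_single e l.length l 0 le_rfl

theorem pairCnt_cons_ne (p q a : Char) (t : List Char) (h : a ≠ p) :
    pairCnt p q (a :: t) = pairCnt p q t := by
  cases t with
  | nil => simp [pairCnt]
  | cons b t' => simp [pairCnt, h]

-- Python str.count of a length-2 pattern with distinct characters is the adjacent-pair count.
theorem countGo_pair (p q : Char) (hpq : p ≠ q) :
    ∀ fuel (l : List Char) acc, l.length ≤ fuel →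
      PySem.Chars.count.go [p, q] fuel l acc = acc + pairCnt p q l := by
  intro fuel
  induction fuel with
  | zero =>
    intro l acc h
    cases l with
    | nil => simp [PySem.Chars.count.go, pairCnt]
    | cons a t => simp at h
  | succ m ih =>
    intro l acc h
    cases l with
    | nil => simp [PySem.Chars.count.go, pairCnt]
    | cons a t =>
      by_cases hm : List.isPrefixOf [p, q] (a :: t) = true
      · obtain ⟨a', t', rfl⟩ : ∃ a' t', t = a' :: t' := by
          cases t with
          | nil => simp [List.isPrefixOf] at hm
          | cons x y => exact ⟨x, y, rfl⟩
        have hap : p = a ∧ q = a' := by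
          simpa [List.isPrefixOf] using hm
        obtain ⟨rfl, rfl⟩ := hap
        have hd : List.drop [p, q].length (p :: q :: t') = t' := rfl
        simp only [PySem.Chars.count.go, hm, if_pos, hd]
        have hlen : t'.length ≤ m := by simp at h; omega
        rw [ih t' (acc + 1) hlen]
        have : pairCnt p q (q :: t') = pairCnt p q t' := pairCnt_cons_ne p q q t' (Ne.symm hpq)
        simp [pairCnt, this]
        omega
      · have hm' : List.isPrefixOf [p, q] (a :: t) = false := Bool.eq_false_iff.mpr hm
        simp only [PySem.Chars.count.go, hm']
        have hlen : t.length ≤ m := by simp at h; omega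
        rw [ih t acc hlen]
        cases t with
        | nil => simp [pairCnt]
        | cons b t' =>
          have hnab : ¬ (a = p ∧ b = q) := by
            intro ⟨h1, h2⟩
            subst h1; subst h2
            exact hm (by simp [List.isPrefixOf])
          simp [pairCnt, hnab]

theorem count_pair (l : List Char) (p q : Char) (hpq : p ≠ q) :
    PySem.Chars.count l [p, q] = pairCnt p q l := by
  unfold PySem.Chars.count
  simpa using countGo_pair p q hpq l.length l 0 le_rfl

-- interior occupancy: non-'E' count plus 'E' count is the length
theorem countP_ne_add_count (l : List Char) :
    l.countP (fun c => c ≠ 'E') + l.count 'E' = l.length := by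
  induction l with
  | nil => simp
  | cons a t ih =>
    by_cases h : a = 'E' <;> simp_all <;> omega

-- the sum of A's per-column contributions over the interior, in B's staged terms
theorem sum_contrib (L1 L2 : List String) :
    ∀ m s0,
      ((List.range' (s0+1) m).map (contribC L1 L2)).sum
      = (((List.range' (s0+1) m).map (fun i => clsB (L1.getD i "") (L2.getD i ""))).countP (fun c => c ≠ 'E') : Int)
        - ((pairCnt 'T' 'S' ((List.range' s0 (m+1)).map (fun i => clsB (L1.getD i "") (L2.getD i ""))) : Nat)
           + (pairCnt 'S' 'T' ((List.range' s0 (m+1)).map (fun i => clsB (L1.getD i "") (L2.getD i ""))) : Nat) : Int) := by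
  intro m
  induction m with
  | zero =>
    intro s0
    simp [pairCnt, List.range'_succ]
  | succ k ih =>
    intro s0
    have h1 : List.range' (s0+1) (k+1) = (s0+1) :: List.range' (s0+2) k := List.range'_succ ..
    have h2 : List.range' s0 (k+1+1) = s0 :: (s0+1) :: List.range' (s0+2) k := by
      rw [List.range'_succ, List.range'_succ]
    have h3 : List.range' (s0+1) (k+1) = (s0+1) :: List.range' (s0+1+1) k := List.range'_succ ..
    rw [h1, h2]
    simp only [List.map_cons, List.sum_cons, List.countP_cons, pairCnt]
    have ihs := ih (s0+1)
    rw [h3] at ihs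
    simp only [List.map_cons] at ihs
    rw [show s0+1+1 = s0+2 from rfl] at ihs
    rw [ihs]
    unfold contribC
    have hs : (s0+1) - 1 = s0 := by omega
    rw [hs]
    split_ifs <;> simp_all <;> (try tauto) <;> omega

theorem solution_alt_eq (L1 L2 : List String) (hne : L1 ≠ []) :
    solution_alt L1 L2 =
      (if L1.getD 0 "" = "x" ∨ L2.getD 0 "" = "x" then (1 : Int) else 0)
        + ((List.range' 1 (L1.length - 1)).map (contribC L1 L2)).sum := by
  have hlen : 0 < L1.length := List.length_pos_iff.mpr hne
  obtain ⟨m, hm⟩ : ∃ m, L1.length = m + 1 := ⟨L1.length - 1, by omega⟩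
  have hrange : List.range L1.length = 0 :: List.range' 1 m := by
    rw [List.range_eq_range', hm, List.range'_succ]
  have hTS : ('T' : Char) ≠ 'S' := by decide
  have hST : ('S' : Char) ≠ 'T' := by decide
  set g := fun i => clsB (L1.getD i "") (L2.getD i "") with hg
  have hlenmap : ((List.range L1.length).map g).length = L1.length := by simp
  have hdrop : ((List.range L1.length).map g).drop 1 = (List.range' 1 m).map g := by
    rw [hrange]; simp
  have hfull : (List.range L1.length).map g = (List.range' 0 (m+1)).map g := by
    rw [hm, ← List.range_eq_range']
  show (if L1.getD 0 "" = "x" ∨ L2.getD 0 "" = "x" then (1:Int) else 0)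
      + ((((List.range L1.length).map g).length : Int) - 1 - (PySem.Chars.count (((List.range L1.length).map g).drop 1) ['E'] : Int))
      - ((PySem.Chars.count ((List.range L1.length).map g) ['T','S'] : Int) + (PySem.Chars.count ((List.range L1.length).map g) ['S','T'] : Int))
      = _
  rw [hlenmap, hdrop, hfull, count_single, count_pair _ _ _ hTS, count_pair _ _ _ hST]
  have hsum := sum_contrib L1 L2 m 0
  simp only [Nat.zero_add] at hsum
  have hm1 : L1.length - 1 = m := by omega
  rw [hm1, hsum]
  have hlist : ((List.range' 1 m).map g).length = m := by simp
  have hsplit := countP_ne_add_count ((List.range' 1 m).map g)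
  rw [hlist] at hsplit
  have hcast : (((List.range' 1 m).map g).countP (fun c => c ≠ 'E') : Int)
      = (m : Int) - (((List.range' 1 m).map g).count 'E' : Int) := by
    omega
  rw [hcast]
  simp only [hg, hm]
  push_cast
  ring

theorem solution_eq (L1 L2 : List String) :
    solution L1 L2 =
      (if L2.getD 0 "" = "x" ∨ L1.getD 0 "" = "x" then (1 : Int) else 0)
        + ((List.range' 1 (L1.length - 1)).map (contribC L1 L2)).sum := by
  unfold solution
  exact solutionLoop_eq L1 L2 (L1.length - 1) 1 _ rfl

-- ===== VERDICT (by name: the statement is the Claim_ definition above) =====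
theorem solution_spec : Claim_equal_solution := by
  intro L1 L2 _ hpre
  unfold Spec_solution
  rw [solution_eq, solution_alt_eq L1 L2 hpre.1]
  congr 1
  exact if_congr or_comm rfl rfl
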